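-- pv_equiv track=rewrite | github.com/gmltmd23/Algorithm-Study | 2022 Study/Greedy/[그리디] 프로그래머스_LEVEL2_2개 이하로 다른 비트.py | solution
-- ===== SOURCE A (Python) =====
-- def solution(numbers):
--     answer = []
--     for number in numbers:
--         binaryNumber = ['0'] + list(bin(number)[2:])
--         index = "".join(binaryNumber).rfind('0')
--         binaryNumber[index] = '1'
--
--         if number % 2 == 1:
--             binaryNumber[index + 1] = '0'
--
--         answer.append(int(''.join(binaryNumber), 2))
--
--     return answer
-- ===== SOURCE B (Python) =====
-- def solution(numbers):
--     # even n: flip the LSB zero -> n+1.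
--     # odd n with k trailing ones: n ^ (n+1) == 2**(k+1)-1, so
--     # ((n^(n+1))+1) >> 2 == 2**(k-1), and the answer is n + 2**(k-1).
--     return [n + 1 if n % 2 == 0 else n + (((n ^ (n + 1)) + 1) >> 2)
--             for n in numbers]
-- ===== Notes on version B (the rewrite author's own statement) =====
-- stated objective: simpler
-- what changed: Replaces building a binary char list with bin(), rfind, index assignment and reparsing via int(_,2) by a one-line closed-form per-element bit formula (even: n+1; odd: n + ((n^(n+1))+1)>>2); Pre_ restricts to the task's natural domain of nonnegative numbers, where A's value on negatives is an artefact of bin()'s 'b' character surviving into int(_,2)'s '0b'-prefix parsing.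
-- outside the precondition, e.g. on solution([-1]): A returns [5], B returns [-1]; on solution([-4]): A returns [5], B returns [-3]
import Mathlib
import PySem

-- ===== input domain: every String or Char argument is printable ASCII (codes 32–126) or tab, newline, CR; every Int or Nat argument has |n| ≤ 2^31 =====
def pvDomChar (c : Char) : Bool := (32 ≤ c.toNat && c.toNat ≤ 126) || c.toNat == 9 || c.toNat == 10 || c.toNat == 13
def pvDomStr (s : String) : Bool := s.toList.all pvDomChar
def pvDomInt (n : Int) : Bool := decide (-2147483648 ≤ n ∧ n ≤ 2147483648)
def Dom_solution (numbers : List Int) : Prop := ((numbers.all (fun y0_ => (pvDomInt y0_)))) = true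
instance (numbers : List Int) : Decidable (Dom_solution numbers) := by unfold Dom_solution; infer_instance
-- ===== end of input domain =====

-- B replaces A's binary-char-list surgery (bin / rfind / index writes / int(_,2)) by a
-- closed-form per-element bit formula (simpler; speed not claimed).

-- ===== PORT A =====

-- bin(m)'s digit characters for a natural m, most significant first (bin(0)'s digit
-- handled in binStr below); exact transliteration of the binary digits bin() prints.
def binDigits : Nat → List Char
  | 0 => []
  | n + 1 => binDigits ((n + 1) / 2) ++ [if (n + 1) % 2 == 1 then '1' else '0']
  decreasing_by exact Nat.div_lt_self (Nat.succ_pos n) (by omega)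

-- bin(n) as a char list ("0b…", "-0b…"): hand port, exact for every int.
def binStr (n : Int) : List Char :=
  if n < 0 then '-' :: '0' :: 'b' :: binDigits n.natAbs
  else if n = 0 then ['0', 'b', '0']
  else '0' :: 'b' :: binDigits n.toNat

-- "".join(cs).rfind(c) for a single-character needle: index of the HIGHEST occurrence,
-- -1 if absent; exact hand port of str.rfind for a 1-char substring.
def lastIdxOf (cs : List Char) (c : Char) : Int :=
  match cs.reverse.findIdx? (fun x => x == c) with
  | some i => (cs.length : Int) - 1 - (i : Int)
  | none => -1

-- int(''.join(cs), 2): optional "0b" prefix then binary digits; exact on the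
-- '0'/'1' char lists (optionally '0b'-prefixed) this program produces.
def parseBin2 (cs : List Char) : Int :=
  let body := match cs with
    | '0' :: 'b' :: rest => rest
    | _ => cs
  body.foldl (fun acc c => 2 * acc + (if c == '1' then 1 else 0)) 0

-- the body of A's for-loop, one number
def elemA (number : Int) : Int :=
  let binaryNumber : List Char := '0' :: PySem.List.slice (binStr number) (some 2) none
  let index : Int := lastIdxOf binaryNumber '0'
  let b1 := PySem.List.pySetD binaryNumber index '1'
  let b2 := if PySem.Int.mod number 2 == 1 then PySem.List.pySetD b1 (index + 1) '0' else b1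
  parseBin2 b2

def solution (numbers : List Int) : List Int :=
  numbers.foldl (fun answer number => answer ++ [elemA number]) []

-- ===== PORT B =====

-- the comprehension's expression, one number
def elemB (n : Int) : Int :=
  if PySem.Int.mod n 2 == 0 then n + 1
  else n + ((PySem.Int.bxor n (n + 1)) + 1) >>> (2 : Nat)

def solution_alt (numbers : List Int) : List Int := numbers.map elemB

-- ===== PRECONDITION & SPEC =====
-- Pre_ restricts to the task's natural domain of nonnegative numbers: on negatives A's
-- value is an artefact of bin()'s 'b' character surviving into int(_, 2)'s "0b" prefix.
def Pre_solution (numbers : List Int) : Prop := ∀ n ∈ numbers, 0 ≤ n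
instance (numbers : List Int) : Decidable (Pre_solution numbers) := by
  unfold Pre_solution; infer_instance

def pvWitness_solution : List Int := [0, 1, 2, 6, 7, 12345]

def Spec_solution (numbers : List Int) (out : List Int) : Prop := out = solution_alt numbers
instance (numbers : List Int) (out : List Int) : Decidable (Spec_solution numbers out) := by
  unfold Spec_solution; infer_instance

-- ===== CLAIM (what is proved, stated in full; the proofs are below) =====
def Claim_equal_solution : Prop :=
  ∀ (numbers : List Int), Dom_solution numbers → Pre_solution numbers →
    Spec_solution numbers (solution numbers)

-- ===== LEMMAS AND PROOFS =====

theorem binDigits_pos (n : Nat) (h : 0 < n) :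
    binDigits n = binDigits (n / 2) ++ [if n % 2 == 1 then '1' else '0'] := by
  cases n with
  | zero => omega
  | succ m => rw [binDigits]

theorem binDigits_no_b : ∀ m : Nat, 'b' ∉ binDigits m := by
  intro m
  induction m using Nat.strong_induction_on with
  | _ m ih =>
    cases m with
    | zero => simp [binDigits]
    | succ k =>
      rw [binDigits_pos (k + 1) (by omega)]
      intro hmem
      rcases List.mem_append.1 hmem with h | h
      · exact ih ((k + 1) / 2) (Nat.div_lt_self (by omega) (by omega)) h
      · simp at h; split at h <;> simp_all

theorem binDigits_ne_nil (m : Nat) (h : 0 < m) : binDigits m ≠ [] := by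
  rw [binDigits_pos m h]; simp

theorem parse_binDigits : ∀ (m : Nat) (a : Int),
    (binDigits m).foldl (fun acc c => 2 * acc + (if c == '1' then 1 else 0)) a
      = a * 2 ^ (binDigits m).length + m := by
  intro m
  induction m using Nat.strong_induction_on with
  | _ m ih =>
    intro a
    cases m with
    | zero => simp [binDigits]
    | succ k =>
      rw [binDigits_pos (k + 1) (by omega)]
      rw [List.foldl_append, List.length_append]
      rw [ih ((k + 1) / 2) (Nat.div_lt_self (by omega) (by omega))]
      by_cases hodd : (k + 1) % 2 = 1
      · have hc : ((k + 1 : Nat) : Int) = 2 * (((k + 1) / 2 : Nat) : Int) + 1 := by omega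
        have h1 : ((k + 1) % 2 == 1) = true := by simp [hodd]
        simp only [h1, List.foldl_cons, List.foldl_nil, List.length_singleton, pow_succ,
          (by decide : (('1':Char) == '1') = true), if_true]
        rw [hc]; ring
      · have hc : ((k + 1 : Nat) : Int) = 2 * (((k + 1) / 2 : Nat) : Int) := by omega
        have h0 : ((k + 1) % 2 == 1) = false := by simp [hodd]
        simp only [h0, List.foldl_cons, List.foldl_nil, List.length_singleton, pow_succ,
          Bool.false_eq_true, if_false, (by decide : (('0':Char) == '1') = false)]
        rw [hc]; ring

theorem parse_replicate : ∀ (k : Nat) (a : Int),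
    (List.replicate k '1').foldl (fun acc c => 2 * acc + (if c == '1' then 1 else 0)) a
      = a * 2 ^ k + (2 ^ k - 1) := by
  intro k
  induction k with
  | zero => simp
  | succ j ih =>
    intro a
    rw [List.replicate_succ, List.foldl_cons, ih]
    norm_num [pow_succ]
    ring

theorem binDigits_two_mul (q : Nat) (h : 0 < q) :
    binDigits (2 * q) = binDigits q ++ ['0'] := by
  rw [binDigits_pos (2 * q) (by omega)]
  have h1 : 2 * q / 2 = q := by omega
  have h2 : 2 * q % 2 = 0 := by omega
  rw [h1, h2]; rfl

theorem binDigits_decomp : ∀ (k q : Nat),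
    binDigits (2 * q * 2 ^ k + (2 ^ k - 1)) = binDigits (2 * q) ++ List.replicate k '1' := by
  intro k
  induction k with
  | zero => intro q; simp
  | succ j ih =>
    intro q
    have hp : 0 < 2 ^ j := Nat.two_pow_pos j
    have e1 : 2 * q * 2 ^ (j + 1) = 4 * (q * 2 ^ j) := by ring
    have e2 : 2 * q * 2 ^ j = 2 * (q * 2 ^ j) := by ring
    have epow : (2:Nat) ^ (j + 1) = 2 * 2 ^ j := by ring
    have hn0 : 0 < 2 * q * 2 ^ (j + 1) + (2 ^ (j + 1) - 1) := by omega
    rw [binDigits_pos _ hn0]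
    have hdiv : (2 * q * 2 ^ (j + 1) + (2 ^ (j + 1) - 1)) / 2 = 2 * q * 2 ^ j + (2 ^ j - 1) := by
      omega
    have hmod : (2 * q * 2 ^ (j + 1) + (2 ^ (j + 1) - 1)) % 2 = 1 := by omega
    rw [hdiv, hmod, ih q, List.replicate_succ']
    simp

theorem lastIdxOf_append (T R : List Char) (h : '0' ∉ R) :
    lastIdxOf (T ++ '0' :: R) '0' = (T.length : Int) := by
  unfold lastIdxOf
  have hrev : (T ++ '0' :: R).reverse = R.reverse ++ '0' :: T.reverse := by simp
  have hnone : R.reverse.findIdx? (fun x => x == '0') = none := by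
    rw [List.findIdx?_eq_none_iff]
    intro x hx
    simp only [beq_eq_false_iff_ne, ne_eq]
    intro hx0; subst hx0; exact h (List.mem_reverse.1 hx)
  rw [hrev, List.findIdx?_append, hnone, List.findIdx?_cons]
  simp
  omega

theorem set_append_len {α : Type} (T : List α) (y v : α) (R : List α) :
    (T ++ y :: R).set T.length v = T ++ v :: R := by
  induction T with
  | nil => rfl
  | cons a t ih => simpa [List.set] using ih

theorem xor_trailing (k q : Nat) :
    (q * 2 ^ (k + 1) + (2 ^ k - 1)) ^^^ (q * 2 ^ (k + 1) + 2 ^ k) = 2 ^ (k + 1) - 1 := by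
  have hp : 0 < 2 ^ k := Nat.two_pow_pos k
  apply Nat.eq_of_testBit_eq
  intro i
  rw [Nat.testBit_xor]
  have h1 : q * 2 ^ (k + 1) + (2 ^ k - 1) = 2 ^ (k + 1) * q + (2 ^ k - 1) := by ring_nf
  have h2 : q * 2 ^ (k + 1) + 2 ^ k = 2 ^ (k + 1) * q + 2 ^ k := by ring_nf
  have hb1 : (2:Nat) ^ k - 1 < 2 ^ (k + 1) := by
    have : (2:Nat) ^ (k + 1) = 2 * 2 ^ k := by ring
    omega
  have hb2 : (2:Nat) ^ k < 2 ^ (k + 1) := by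
    have : (2:Nat) ^ (k + 1) = 2 * 2 ^ k := by ring
    omega
  rw [h1, h2, Nat.testBit_two_pow_mul_add q hb1 i, Nat.testBit_two_pow_mul_add q hb2 i,
    Nat.testBit_two_pow_sub_one, Nat.testBit_two_pow_sub_one, Nat.testBit_two_pow]
  by_cases hik : i < k + 1
  · rw [if_pos hik, if_pos hik]
    by_cases hik' : i < k
    · have hne : ¬ (k = i) := by omega
      simp [hik', hne, hik]
    · have heq : k = i := by omega
      simp [hik', heq, hik]
  · rw [if_neg hik, if_neg hik]
    simp [hik]

theorem odd_decomp (m : Nat) (h : m % 2 = 1) :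
    ∃ k q : Nat, 1 ≤ k ∧ m = 2 * q * 2 ^ k + (2 ^ k - 1) := by
  induction m using Nat.strong_induction_on with
  | _ m ih =>
    by_cases h4 : m % 4 = 1
    · exact ⟨1, m / 4, by omega, by omega⟩
    · have h3 : m % 4 = 3 := by omega
      have hm' : (m / 2) % 2 = 1 := by omega
      obtain ⟨k, q, hk, hq⟩ := ih (m / 2) (by omega) hm'
      refine ⟨k + 1, q, by omega, ?_⟩
      have hp : 0 < 2 ^ k := Nat.two_pow_pos k
      have e1 : 2 * q * 2 ^ (k + 1) = 2 * (2 * q * 2 ^ k) := by ring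
      have epow : (2:Nat) ^ (k + 1) = 2 * 2 ^ k := by ring
      omega

theorem elemB_even (m : Nat) (h : m % 2 = 0) : elemB (m : Int) = (m : Int) + 1 := by
  have hmod : PySem.Int.mod (m : Int) 2 = 0 := by
    rw [PySem.Int.mod_eq_emod_of_pos (by omega)]; omega
  unfold elemB
  rw [hmod]
  simp

theorem elemB_odd (m k q : Nat) (hk : 1 ≤ k) (hm : m = 2 * q * 2 ^ k + (2 ^ k - 1)) :
    elemB (m : Int) = (m : Int) + 2 ^ (k - 1 : Nat) := by
  have hp : 0 < 2 ^ k := Nat.two_pow_pos k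
  have hpow : (2:Nat) ^ k = 2 * 2 ^ (k - 1) := by
    conv_lhs => rw [(by omega : k = (k - 1) + 1)]
    ring
  have hmodd : m % 2 = 1 := by
    have e1 : 2 * q * 2 ^ k = 2 * (q * 2 ^ k) := by ring
    omega
  have hodd : ¬ (PySem.Int.mod (m : Int) 2 == 0) := by
    rw [PySem.Int.mod_eq_emod_of_pos (by omega)]
    have : (m : Int) % 2 = 1 := by omega
    simp [this]
  unfold elemB
  rw [if_neg hodd]
  have hsucc : ((m : Int) + 1) = ((m + 1 : Nat) : Int) := by push_cast; ring
  rw [hsucc, PySem.Int.bxor_natCast]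
  have hm1 : m + 1 = q * 2 ^ (k + 1) + 2 ^ k := by
    have e1 : 2 * q * 2 ^ k = q * 2 ^ (k + 1) := by ring
    omega
  have hmx : m = q * 2 ^ (k + 1) + (2 ^ k - 1) := by
    have e1 : 2 * q * 2 ^ k = q * 2 ^ (k + 1) := by ring
    omega
  have hxor : m ^^^ (m + 1) = 2 ^ (k + 1) - 1 := by
    rw [hm1]
    conv_lhs => rw [hmx]
    exact xor_trailing k q
  rw [hxor]
  have hp1 : 0 < 2 ^ (k + 1) := Nat.two_pow_pos (k + 1)
  have hplus : ((2 ^ (k + 1) - 1 : Nat) : Int) + 1 = ((2 ^ (k + 1) : Nat) : Int) := by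
    push_cast [Nat.cast_sub (by omega : 1 ≤ 2 ^ (k + 1))]; ring
  rw [hplus, ← Int.natCast_shiftRight]
  have hdivpow : (2:Nat) ^ (k + 1) >>> 2 = 2 ^ (k - 1) := by
    rw [Nat.shiftRight_eq_div_pow]
    have : (2:Nat) ^ (k + 1) = 2 ^ (k - 1) * 2 ^ 2 := by
      rw [← pow_add]
      congr 1
      omega
    rw [this, Nat.mul_div_cancel _ (by norm_num)]
  rw [hdivpow]
  push_cast
  ring

theorem parse_zero_cons (c : Char) (hc : c ≠ 'b') (t : List Char) :
    parseBin2 ('0' :: c :: t)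
      = ('0' :: c :: t).foldl (fun acc c => 2 * acc + (if c == '1' then 1 else 0)) 0 := by
  unfold parseBin2
  cases c with
  | mk v =>
    simp only
    split
    next h => simp_all
    next => rfl

theorem parse_one_cons (t : List Char) :
    parseBin2 ('1' :: t)
      = ('1' :: t).foldl (fun acc c => 2 * acc + (if c == '1' then 1 else 0)) 0 := rfl

theorem binStr_natCast (m : Nat) (hz : m ≠ 0) :
    binStr (m : Int) = '0' :: 'b' :: binDigits m := by
  unfold binStr
  rw [if_neg (by omega), if_neg (by exact_mod_cast hz)]
  rw [show ((m : Int)).toNat = m from by omega]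

theorem slice_binStr (m : Nat) (hz : m ≠ 0) :
    PySem.List.slice (binStr (m : Int)) (some 2) none = binDigits m := by
  rw [PySem.List.slice_from _ (by omega : (0:Int) ≤ 2), binStr_natCast m hz]; rfl

theorem binDigits_head (q : Nat) (hq : 0 < q) :
    ∃ c rest, binDigits q = c :: rest ∧ c ≠ 'b' := by
  cases hdq : binDigits q with
  | nil => exact absurd hdq (binDigits_ne_nil q hq)
  | cons c rest =>
    refine ⟨c, rest, rfl, fun hcb => binDigits_no_b q ?_⟩
    rw [hdq, hcb]
    exact List.mem_cons_self

theorem elemA_even (q : Nat) (hq : 0 < q) : elemA ((2 * q : Nat) : Int) = (2 * q : Nat) + 1 := by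
  obtain ⟨c, rest, hcr, hcb⟩ := binDigits_head q hq
  have hshape : ('0' :: binDigits (2 * q) : List Char)
      = ('0' :: binDigits q) ++ '0' :: ([] : List Char) := by
    rw [binDigits_two_mul q hq]; simp
  have heven : (PySem.Int.mod ((2 * q : Nat) : Int) 2 == 1) = false := by
    rw [PySem.Int.mod_eq_emod_of_pos (by omega)]
    have h0 : ((2 * q : Nat) : Int) % 2 = 0 := by omega
    rw [h0]
    rfl
  unfold elemA
  simp only [slice_binStr (2 * q) (by omega), hshape, heven, Bool.false_eq_true, if_false]
  rw [lastIdxOf_append _ _ (by simp)]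
  rw [PySem.List.pySetD_of_nonneg _ _ (by omega), Int.toNat_natCast, set_append_len]
  rw [show (('0' :: binDigits q) ++ '1' :: ([] : List Char)) = '0' :: c :: (rest ++ ['1']) by
    rw [hcr]; simp]
  rw [parse_zero_cons c hcb]
  rw [show ('0' :: c :: (rest ++ ['1']) : List Char) = '0' :: ((binDigits q) ++ ['1']) by
    rw [hcr]; simp]
  simp only [List.foldl_cons, List.foldl_append, List.foldl_nil,
    (by decide : (('0':Char) == '1') = false), (by decide : (('1':Char) == '1') = true),
    Bool.false_eq_true, if_false, if_true]
  rw [show (2 * (0:Int) + 0) = 0 by ring, parse_binDigits]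
  push_cast
  ring

theorem elemA_odd (m k q : Nat) (hk : 1 ≤ k) (hm : m = 2 * q * 2 ^ k + (2 ^ k - 1)) :
    elemA (m : Int) = (m : Int) + 2 ^ (k - 1 : Nat) := by
  have hp : 0 < 2 ^ k := Nat.two_pow_pos k
  have hp2 : 2 ≤ 2 ^ k := by
    conv_rhs => rw [(by omega : k = (k - 1) + 1)]
    have := Nat.two_pow_pos (k - 1)
    calc 2 = 2 * 1 := by norm_num
    _ ≤ 2 * 2 ^ (k - 1) := by omega
    _ = 2 ^ (k - 1 + 1) := by ring
  have hpkN : (2:Nat) ^ k = 2 * 2 ^ (k - 1) := by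
    conv_lhs => rw [(by omega : k = (k - 1) + 1)]
    ring
  have e1 : 2 * q * 2 ^ k = 2 * (q * 2 ^ k) := by ring
  have hz : m ≠ 0 := by omega
  have hmodd : m % 2 = 1 := by omega
  have hodd : (PySem.Int.mod (m : Int) 2 == 1) = true := by
    rw [PySem.Int.mod_eq_emod_of_pos (by omega)]
    have : (m : Int) % 2 = 1 := by omega
    simp [this]
  have hrep : List.replicate k '1' = '1' :: List.replicate (k - 1) '1' := by
    conv_lhs => rw [(by omega : k = (k - 1) + 1)]
    rw [List.replicate_succ]
  have hnorep : ('0' : Char) ∉ List.replicate k '1' := by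
    intro hmem
    exact absurd (List.eq_of_mem_replicate hmem) (by decide)
  have hmI : (m : Int) = 2 * (q : Int) * 2 ^ k + (2 ^ k - 1) := by
    rw [hm]
    push_cast [Nat.cast_sub (by omega : 1 ≤ 2 ^ k)]
    ring
  have hpkI : ((2:Int)) ^ k = 2 * 2 ^ (k - 1 : Nat) := by
    conv_lhs => rw [(by omega : k = (k - 1) + 1)]
    ring
  by_cases hq : q = 0
  · -- m = 2^k - 1: the prepended '0' is the one flipped
    subst hq
    have hdig : binDigits m = List.replicate k '1' := by
      have h0 : (2:Nat) * 0 = 0 := by norm_num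
      rw [hm, h0]
      have := binDigits_decomp k 0
      rw [h0] at this
      simpa [binDigits] using this
    unfold elemA
    simp only [slice_binStr m hz, hdig, hodd, if_true]
    rw [show ('0' :: List.replicate k '1' : List Char)
        = ([] : List Char) ++ '0' :: List.replicate k '1' from by simp]
    rw [lastIdxOf_append _ _ hnorep]
    rw [PySem.List.pySetD_of_nonneg _ _ (by omega)]
    simp only [List.length_nil, Nat.cast_zero, List.nil_append]
    rw [PySem.List.pySetD_of_nonneg _ _ (by omega)]
    rw [show ((0:Int) + 1).toNat = 1 from rfl]
    rw [show (Int.toNat 0) = 0 from rfl]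
    rw [show (('0' :: List.replicate k '1').set 0 '1' : List Char)
        = '1' :: List.replicate k '1' from rfl]
    rw [hrep]
    rw [show ('1' :: '1' :: List.replicate (k - 1) '1' : List Char).set 1 '0'
        = '1' :: '0' :: List.replicate (k - 1) '1' from rfl]
    rw [parse_one_cons]
    simp only [List.foldl_cons,
      (by decide : (('0':Char) == '1') = false), (by decide : (('1':Char) == '1') = true),
      Bool.false_eq_true, if_false, if_true]
    rw [parse_replicate]
    rw [hmI, hpkI]
    ring
  · have hq0 : 0 < q := by omega
    obtain ⟨c, rest, hcr, hcb⟩ := binDigits_head q hq0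
    have hshape : ('0' :: binDigits m : List Char)
        = ('0' :: binDigits q) ++ '0' :: List.replicate k '1' := by
      rw [hm, binDigits_decomp k q, binDigits_two_mul q hq0]; simp
    unfold elemA
    simp only [slice_binStr m hz, hshape, hodd, if_true]
    rw [lastIdxOf_append _ _ hnorep]
    -- the OUTER pySetD (index+1, the '0' write) is rewritten first, then the inner one
    rw [PySem.List.pySetD_of_nonneg _ _ (by omega)]
    rw [PySem.List.pySetD_of_nonneg _ _ (by omega), Int.toNat_natCast, set_append_len]
    rw [show ((((('0' :: binDigits q : List Char)).length : Int)) + 1).toNat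
        = ('0' :: binDigits q : List Char).length + 1 from by omega]
    rw [hrep]
    rw [show (('0' :: binDigits q) ++ '1' :: '1' :: List.replicate (k - 1) '1' : List Char)
        = (('0' :: binDigits q) ++ ['1']) ++ '1' :: List.replicate (k - 1) '1' from by simp]
    rw [show ('0' :: binDigits q : List Char).length + 1
        = (('0' :: binDigits q) ++ ['1'] : List Char).length from by simp]
    rw [set_append_len]
    rw [show ((('0' :: binDigits q) ++ ['1']) ++ '0' :: List.replicate (k - 1) '1' : List Char)
        = '0' :: c :: ((rest ++ ['1', '0']) ++ List.replicate (k - 1) '1') from by rw [hcr]; simp]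
    rw [parse_zero_cons c hcb]
    rw [show ('0' :: c :: ((rest ++ ['1', '0']) ++ List.replicate (k - 1) '1') : List Char)
        = '0' :: ((binDigits q ++ ['1', '0']) ++ List.replicate (k - 1) '1') from by rw [hcr]; simp]
    simp only [List.foldl_cons, List.foldl_append, List.foldl_nil,
      (by decide : (('0':Char) == '1') = false), (by decide : (('1':Char) == '1') = true),
      Bool.false_eq_true, if_false, if_true]
    rw [show (2 * (0:Int) + 0) = 0 by ring, parse_binDigits, parse_replicate]
    rw [hmI, hpkI]
    ring

theorem elem_eq (m : Nat) : elemA (m : Int) = elemB (m : Int) := by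
  by_cases hz : m = 0
  · subst hz; decide
  by_cases hpar : m % 2 = 0
  · obtain ⟨q, hq⟩ : ∃ q, m = 2 * q := ⟨m / 2, by omega⟩
    have hq0 : 0 < q := by omega
    rw [hq, elemA_even q hq0, elemB_even (2 * q) (by omega)]
  · obtain ⟨k, q, hk, hm⟩ := odd_decomp m (by omega)
    rw [elemA_odd m k q hk hm, elemB_odd m k q hk hm]

theorem solution_spec_aux (numbers : List Int) (h : ∀ n ∈ numbers, 0 ≤ n) :
    solution numbers = solution_alt numbers := by
  unfold solution solution_alt
  rw [PySem.List.foldl_append_singleton_eq_map]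
  simp only [List.nil_append]
  apply List.map_congr_left
  intro n hn
  have h0 : 0 ≤ n := h n hn
  obtain ⟨m, rfl⟩ : ∃ m : Nat, n = (m : Int) := ⟨n.toNat, by omega⟩
  exact elem_eq m

-- ===== VERDICT (by name: the statement is the Claim_ definition above) =====
theorem solution_spec : Claim_equal_solution := by
  intro numbers _ hpre
  exact solution_spec_aux numbers hpre
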